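-- pv_equiv track=rewrite | github.com/LamineLSU/ABLE_artifacts | prompt_strategies/prompt_loader.py | _generate_error_analysis
-- ===== SOURCE A (Python) =====
-- from typing import Dict, List, Optional, Any, Union
--
-- def _generate_error_analysis(errors: List[str]) -> str:
--
--     analysis = []
--     seen_issues = set()
--
--     for error in errors:
--         error_lower = error.lower()
--
--         if "too short" in error_lower and "length" not in seen_issues:
--             analysis.append("**Pattern Length Issue:** Your patterns are too short. Each pattern must be 10-20 bytes. Combine 2-4 consecutive instructions from the trace into each pattern.")
--             seen_issues.add("length")
--
--         elif ("wildcard" in error_lower or "address" in error_lower or "hardcoded" in error_lower) and "wildcard" not in seen_issues: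
--             analysis.append("**Wildcard Issue:** You have hardcoded address or offset bytes. Replace all memory addresses, CALL/JMP offsets (4 bytes after opcode), and displacement bytes with ?? wildcards.")
--             seen_issues.add("wildcard")
--
--         elif ("duplicate" in error_lower or "same" in error_lower or "identical" in error_lower) and "duplicate" not in seen_issues:
--             analysis.append("**Duplicate Patterns:** Two or more patterns are identical. Each of the 3 patterns must be a DIFFERENT hex sequence targeting different evasion points.")
--             seen_issues.add("duplicate")
--
--         elif ("cape_options" in error_lower or "detection rule" in error_lower or "bypass rule" in error_lower) and "cape" not in seen_issues:
--             analysis.append("**⚠️ CRITICAL - Missing cape_options:** Your rule is a detection rule, NOT a bypass rule. You MUST add cape_options in the meta section. Copy this EXACTLY:\n\n`cape_options = \"bp0=$pattern0+0,action0=skip,bp1=$pattern1+0,action1=skip,bp2=$pattern2+0,action2=skip,count=0\"`\n\nThis tells CAPE to set breakpoints on each pattern and skip execution.")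
--             seen_issues.add("cape")
--
--         elif ("syntax" in error_lower or "parse" in error_lower or "invalid" in error_lower) and "syntax" not in seen_issues:
--             analysis.append("**YARA Syntax Error:** The rule has syntax errors. Check: matching braces { }, proper hex format with spaces between bytes, and correct string assignment format `$name = { hex bytes }`")
--             seen_issues.add("syntax")
--
--         elif ("pattern" in error_lower and ("3" in error_lower or "count" in error_lower or "only" in error_lower)) and "count" not in seen_issues:
--             analysis.append("**⚠️ CRITICAL - Pattern Count Issue:** The rule must have EXACTLY 3 patterns named `$pattern0`, `$pattern1`, `$pattern2`. You currently have the wrong number. Go back to the trace and select 3 DIFFERENT evasion points.")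
--             seen_issues.add("count")
--
--         elif ("one pattern" in error_lower or "single pattern" in error_lower) and "count" not in seen_issues:
--             analysis.append("**⚠️ CRITICAL - Only 1 Pattern Found:** You generated only 1 pattern, but 3 are required. Go back to the trace and identify 3 DIFFERENT bypass points. Name them `$pattern0`, `$pattern1`, `$pattern2`.")
--             seen_issues.add("count")
--
--     if not analysis:
--         analysis.append("Please review the errors above and ensure your rule follows all requirements: 3 different patterns, 10-20 bytes each, wildcards for addresses, and cape_options in meta.")
--
--     return "\n\n".join(analysis)
-- ===== SOURCE B (Python) =====
-- from typing import List, Optional, Tuple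
--
-- _MSG_LENGTH = "**Pattern Length Issue:** Your patterns are too short. Each pattern must be 10-20 bytes. Combine 2-4 consecutive instructions from the trace into each pattern."
-- _MSG_WILDCARD = "**Wildcard Issue:** You have hardcoded address or offset bytes. Replace all memory addresses, CALL/JMP offsets (4 bytes after opcode), and displacement bytes with ?? wildcards."
-- _MSG_DUPLICATE = "**Duplicate Patterns:** Two or more patterns are identical. Each of the 3 patterns must be a DIFFERENT hex sequence targeting different evasion points."
-- _MSG_CAPE = "**\u26a0\ufe0f CRITICAL - Missing cape_options:** Your rule is a detection rule, NOT a bypass rule. You MUST add cape_options in the meta section. Copy this EXACTLY:\n\n`cape_options = \"bp0=$pattern0+0,action0=skip,bp1=$pattern1+0,action1=skip,bp2=$pattern2+0,action2=skip,count=0\"`\n\nThis tells CAPE to set breakpoints on each pattern and skip execution."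
-- _MSG_SYNTAX = "**YARA Syntax Error:** The rule has syntax errors. Check: matching braces { }, proper hex format with spaces between bytes, and correct string assignment format `$name = { hex bytes }`"
-- _MSG_COUNT3 = "**\u26a0\ufe0f CRITICAL - Pattern Count Issue:** The rule must have EXACTLY 3 patterns named `$pattern0`, `$pattern1`, `$pattern2`. You currently have the wrong number. Go back to the trace and select 3 DIFFERENT evasion points."
-- _MSG_COUNT1 = "**\u26a0\ufe0f CRITICAL - Only 1 Pattern Found:** You generated only 1 pattern, but 3 are required. Go back to the trace and identify 3 DIFFERENT bypass points. Name them `$pattern0`, `$pattern1`, `$pattern2`."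
-- _FALLBACK = "Please review the errors above and ensure your rule follows all requirements: 3 different patterns, 10-20 bytes each, wildcards for addresses, and cape_options in meta."
--
--
-- def _candidates(el: str) -> List[Tuple[str, str]]:
--     """Stage 1 (stateless): the ordered (issue-key, message) diagnoses this one
--     lowercased error text matches, independent of any other error."""
--     c = []
--     if "too short" in el:
--         c.append(("length", _MSG_LENGTH))
--     if "wildcard" in el or "address" in el or "hardcoded" in el:
--         c.append(("wildcard", _MSG_WILDCARD))
--     if "duplicate" in el or "same" in el or "identical" in el:
--         c.append(("duplicate", _MSG_DUPLICATE))
--     if "cape_options" in el or "detection rule" in el or "bypass rule" in el: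
--         c.append(("cape", _MSG_CAPE))
--     if "syntax" in el or "parse" in el or "invalid" in el:
--         c.append(("syntax", _MSG_SYNTAX))
--     if "pattern" in el and ("3" in el or "count" in el or "only" in el):
--         c.append(("count", _MSG_COUNT3))
--     if "one pattern" in el or "single pattern" in el:
--         c.append(("count", _MSG_COUNT1))
--     return c
--
--
-- def _first_unseen(pairs: List[Tuple[str, str]], seen: frozenset) -> Optional[Tuple[str, str]]:
--     for key, msg in pairs:
--         if key not in seen:
--             return (key, msg)
--     return None
--
--
-- def _select(cands: List[List[Tuple[str, str]]], seen: frozenset) -> List[str]: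
--     """Stage 2: per candidate list, fire the first candidate whose key is new."""
--     msgs = []
--     for pairs in cands:
--         hit = _first_unseen(pairs, seen)
--         if hit is not None:
--             msgs = msgs + [hit[1]]
--             seen = seen | {hit[0]}
--     return msgs
--
--
-- def _generate_error_analysis(errors: List[str]) -> str:
--     msgs = _select([_candidates(e.lower()) for e in errors], frozenset())
--     return "\n\n".join(msgs) if msgs else _FALLBACK
-- ===== Notes on version B (the rewrite author's own statement) =====
-- stated objective: alternative
-- what changed: Splits A's single fused stateful elif loop into a staged pipeline: a stateless pass computes each error's ordered (key,message) candidate diagnoses, a separate selection pass fires the first unseen-key candidate per list, and a final render applies the fallback.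
import Mathlib
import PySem

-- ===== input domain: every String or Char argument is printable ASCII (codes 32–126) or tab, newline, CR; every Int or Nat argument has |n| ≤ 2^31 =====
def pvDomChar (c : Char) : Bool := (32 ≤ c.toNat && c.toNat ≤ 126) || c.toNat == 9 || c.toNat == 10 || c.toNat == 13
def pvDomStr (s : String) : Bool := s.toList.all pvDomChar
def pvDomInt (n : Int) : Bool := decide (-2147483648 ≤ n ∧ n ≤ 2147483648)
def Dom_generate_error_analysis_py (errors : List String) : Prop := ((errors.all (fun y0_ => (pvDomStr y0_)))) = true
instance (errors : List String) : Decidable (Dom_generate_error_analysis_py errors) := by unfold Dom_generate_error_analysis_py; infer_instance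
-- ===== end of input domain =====

-- B replaces A's fused stateful elif loop by a three-stage pipeline (stateless candidate
-- matching, recursive seen-key selection, final render); objective: alternative, same cost.

def pvMsgLength : String := "**Pattern Length Issue:** Your patterns are too short. Each pattern must be 10-20 bytes. Combine 2-4 consecutive instructions from the trace into each pattern."
def pvMsgWildcard : String := "**Wildcard Issue:** You have hardcoded address or offset bytes. Replace all memory addresses, CALL/JMP offsets (4 bytes after opcode), and displacement bytes with ?? wildcards."
def pvMsgDuplicate : String := "**Duplicate Patterns:** Two or more patterns are identical. Each of the 3 patterns must be a DIFFERENT hex sequence targeting different evasion points."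
def pvMsgCape : String := "**⚠️ CRITICAL - Missing cape_options:** Your rule is a detection rule, NOT a bypass rule. You MUST add cape_options in the meta section. Copy this EXACTLY:\n\n`cape_options = \"bp0=$pattern0+0,action0=skip,bp1=$pattern1+0,action1=skip,bp2=$pattern2+0,action2=skip,count=0\"`\n\nThis tells CAPE to set breakpoints on each pattern and skip execution."
def pvMsgSyntax : String := "**YARA Syntax Error:** The rule has syntax errors. Check: matching braces { }, proper hex format with spaces between bytes, and correct string assignment format `$name = { hex bytes }`"
def pvMsgCount3 : String := "**⚠️ CRITICAL - Pattern Count Issue:** The rule must have EXACTLY 3 patterns named `$pattern0`, `$pattern1`, `$pattern2`. You currently have the wrong number. Go back to the trace and select 3 DIFFERENT evasion points."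
def pvMsgCount1 : String := "**⚠️ CRITICAL - Only 1 Pattern Found:** You generated only 1 pattern, but 3 are required. Go back to the trace and identify 3 DIFFERENT bypass points. Name them `$pattern0`, `$pattern1`, `$pattern2`."
def pvMsgFallback : String := "Please review the errors above and ensure your rule follows all requirements: 3 different patterns, 10-20 bytes each, wildcards for addresses, and cape_options in meta."

-- ===== PORT A =====
-- A's per-error elif chain, transliterated branch by branch.
def pvStepA (st : List String × PySem.Set String) (error : String) : List String × PySem.Set String :=
  let el := PySem.Str.lower error
  let analysis := st.1
  let seen := st.2
  if PySem.Str.isIn "too short" el && !(PySem.Set.contains seen "length") then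
    (analysis ++ [pvMsgLength], PySem.Set.add seen "length")
  else if (PySem.Str.isIn "wildcard" el || PySem.Str.isIn "address" el || PySem.Str.isIn "hardcoded" el) && !(PySem.Set.contains seen "wildcard") then
    (analysis ++ [pvMsgWildcard], PySem.Set.add seen "wildcard")
  else if (PySem.Str.isIn "duplicate" el || PySem.Str.isIn "same" el || PySem.Str.isIn "identical" el) && !(PySem.Set.contains seen "duplicate") then
    (analysis ++ [pvMsgDuplicate], PySem.Set.add seen "duplicate")
  else if (PySem.Str.isIn "cape_options" el || PySem.Str.isIn "detection rule" el || PySem.Str.isIn "bypass rule" el) && !(PySem.Set.contains seen "cape") then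
    (analysis ++ [pvMsgCape], PySem.Set.add seen "cape")
  else if (PySem.Str.isIn "syntax" el || PySem.Str.isIn "parse" el || PySem.Str.isIn "invalid" el) && !(PySem.Set.contains seen "syntax") then
    (analysis ++ [pvMsgSyntax], PySem.Set.add seen "syntax")
  else if (PySem.Str.isIn "pattern" el && (PySem.Str.isIn "3" el || PySem.Str.isIn "count" el || PySem.Str.isIn "only" el)) && !(PySem.Set.contains seen "count") then
    (analysis ++ [pvMsgCount3], PySem.Set.add seen "count")
  else if (PySem.Str.isIn "one pattern" el || PySem.Str.isIn "single pattern" el) && !(PySem.Set.contains seen "count") then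
    (analysis ++ [pvMsgCount1], PySem.Set.add seen "count")
  else
    (analysis, seen)

def generate_error_analysis_py (errors : List String) : String :=
  let res := errors.foldl pvStepA ([], PySem.Set.empty)
  let analysis := if res.1.isEmpty then res.1 ++ [pvMsgFallback] else res.1
  PySem.Str.join "\n\n" analysis

-- ===== PORT B =====
-- Stage 1 (stateless): the ordered (issue-key, message) diagnoses one lowercased error matches.
def pvCandidates (el : String) : List (String × String) :=
  (if PySem.Str.isIn "too short" el then [("length", pvMsgLength)] else []) ++
  (if PySem.Str.isIn "wildcard" el || PySem.Str.isIn "address" el || PySem.Str.isIn "hardcoded" el then [("wildcard", pvMsgWildcard)] else []) ++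
  (if PySem.Str.isIn "duplicate" el || PySem.Str.isIn "same" el || PySem.Str.isIn "identical" el then [("duplicate", pvMsgDuplicate)] else []) ++
  (if PySem.Str.isIn "cape_options" el || PySem.Str.isIn "detection rule" el || PySem.Str.isIn "bypass rule" el then [("cape", pvMsgCape)] else []) ++
  (if PySem.Str.isIn "syntax" el || PySem.Str.isIn "parse" el || PySem.Str.isIn "invalid" el then [("syntax", pvMsgSyntax)] else []) ++
  (if PySem.Str.isIn "pattern" el && (PySem.Str.isIn "3" el || PySem.Str.isIn "count" el || PySem.Str.isIn "only" el) then [("count", pvMsgCount3)] else []) ++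
  (if PySem.Str.isIn "one pattern" el || PySem.Str.isIn "single pattern" el then [("count", pvMsgCount1)] else [])

def pvFirstUnseen : List (String × String) → PySem.Set String → Option (String × String)
  | [], _ => none
  | (key, msg) :: rest, seen =>
    if !(PySem.Set.contains seen key) then some (key, msg) else pvFirstUnseen rest seen

-- Stage 2: per candidate list, fire the first candidate whose key is new.
def pvStepB (st : List String × PySem.Set String) (pairs : List (String × String)) : List String × PySem.Set String :=
  match pvFirstUnseen pairs st.2 with
  | none => st
  | some (key, msg) => (st.1 ++ [msg], PySem.Set.add st.2 key)

def generate_error_analysis_py_alt (errors : List String) : String :=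
  let msgs := ((errors.map (fun e => pvCandidates (PySem.Str.lower e))).foldl pvStepB ([], PySem.Set.empty)).1
  if msgs.isEmpty then pvMsgFallback else PySem.Str.join "\n\n" msgs

-- ===== PRECONDITION & SPEC =====
def Spec_generate_error_analysis_py (errors : List String) (out : String) : Prop := out = generate_error_analysis_py_alt errors
instance (errors : List String) (out : String) : Decidable (Spec_generate_error_analysis_py errors out) := by unfold Spec_generate_error_analysis_py; infer_instance

-- ===== CLAIM (what is proved, stated in full; the proofs are below) =====
def Claim_equal_generate_error_analysis_py : Prop := ∀ (errors : List String), Dom_generate_error_analysis_py errors → Spec_generate_error_analysis_py errors (generate_error_analysis_py errors)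

-- ===== LEMMAS AND PROOFS =====

theorem pvFirstUnseen_if (b : Bool) (k m : String) (rest : List (String × String)) (seen : PySem.Set String) :
    pvFirstUnseen ((if b then [(k, m)] else []) ++ rest) seen =
      if b && !(PySem.Set.contains seen k) then some (k, m) else pvFirstUnseen rest seen := by
  cases b <;> simp [pvFirstUnseen]

theorem pvFirstUnseen_if_nil (b : Bool) (k m : String) (seen : PySem.Set String) :
    pvFirstUnseen (if b then [(k, m)] else []) seen =
      if b && !(PySem.Set.contains seen k) then some (k, m) else none := by
  cases b <;> simp [pvFirstUnseen]

theorem pvStepA_eq (p : List String) (s : PySem.Set String) (e : String) :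
    pvStepA (p, s) e = pvStepB (p, s) (pvCandidates (PySem.Str.lower e)) := by
  simp only [pvStepA, pvStepB, pvCandidates, List.append_assoc, pvFirstUnseen_if, pvFirstUnseen_if_nil]
  split_ifs <;> rfl

theorem pvFold_eq (errors : List String) (st : List String × PySem.Set String) :
    errors.foldl pvStepA st =
      (errors.map (fun e => pvCandidates (PySem.Str.lower e))).foldl pvStepB st := by
  induction errors generalizing st with
  | nil => simp only [List.map_nil, List.foldl_nil]
  | cons e es ih =>
    obtain ⟨p, s⟩ := st
    simp only [List.map_cons, List.foldl_cons, pvStepA_eq]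
    exact ih _

theorem join_singleton_str (x : String) : PySem.Str.join "\n\n" [x] = x := by
  simp [PySem.Str.join, PySem.Chars.join_singleton]

-- ===== VERDICT (by name: the statement is the Claim_ definition above) =====
theorem generate_error_analysis_py_spec : Claim_equal_generate_error_analysis_py := by
  intro errors _
  unfold Spec_generate_error_analysis_py
  simp only [generate_error_analysis_py, generate_error_analysis_py_alt, pvFold_eq]
  cases h : ((errors.map (fun e => pvCandidates (PySem.Str.lower e))).foldl pvStepB ([], PySem.Set.empty)).1 with
  | nil => simp [join_singleton_str]
  | cons a l => simp
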